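-- pv_equiv track=rewrite | github.com/bancorprotocol/fastlane-bot | fastlane_bot/config/config.py | is_config_item
-- ===== SOURCE A (Python) =====
-- def is_config_item(item: str) -> bool:
--     """
--     Checks if an item is a valid configuration item.
--
--     Args:
--         item: The item to check.
--
--     Returns:
--         bool: True if the item is a valid configuration item, False otherwise.
--     """
--
--     if item in {"w3", "connection", "w3_async"}:
--         return True
--     if len(item) < 3:
--         return False
--     if not item[0].isupper():
--         return False
--     for c in item[1:]:
--         if not (item.isupper() or item.isnumeric() or item == "_"):
--             return False
--     return True
-- ===== SOURCE B (Python) =====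
-- def is_config_item(item: str) -> bool:
--     if item in {"w3", "connection", "w3_async"}:
--         return True
--     return len(item) >= 3 and item[0].isupper() and not any(c.islower() for c in item)
-- ===== Notes on version B (the rewrite author's own statement) =====
-- stated objective: simpler
-- what changed: Replaced the loop that re-tests the whole-string predicate (item.isupper() or item.isnumeric() or item == "_") per character with a single character-level scan for a lowercase letter: under the guards len>=3 and item[0].isupper(), isnumeric() and == "_" can never hold and isupper() reduces to 'no lowercase character', so B checks exactly that in one pass.
import Mathlib
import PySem

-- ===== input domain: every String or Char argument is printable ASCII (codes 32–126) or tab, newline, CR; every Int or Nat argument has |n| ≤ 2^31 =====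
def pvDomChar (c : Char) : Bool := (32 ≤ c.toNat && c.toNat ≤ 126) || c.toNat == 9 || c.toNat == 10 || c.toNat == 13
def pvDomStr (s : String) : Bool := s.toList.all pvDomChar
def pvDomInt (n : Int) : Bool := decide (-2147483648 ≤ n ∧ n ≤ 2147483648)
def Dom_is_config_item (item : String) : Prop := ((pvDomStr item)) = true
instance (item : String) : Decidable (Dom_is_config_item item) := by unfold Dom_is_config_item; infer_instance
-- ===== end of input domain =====

-- B replaces A's loop over whole-string predicates by one character-level scan for a lowercase letter; same return value everywhere.

-- str.isupper(): at least one cased char and no lowercase cased char — exact on ASCII,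
-- where the cased characters are exactly a-z / A-Z.
def pyStrIsupper (cs : List Char) : Bool :=
  cs.any (fun c => PySem.Chars.isupper c) && cs.all (fun c => !PySem.Chars.islower c)

-- str.isnumeric(): on ASCII exactly str.isdigit() (non-empty, all 0-9) — exact on ASCII.
def pyStrIsnumeric (cs : List Char) : Bool :=
  PySem.Chars.strIsdigit cs

-- ===== PORT A =====
-- the loop body of A: tests the same whole-string condition once per character of item[1:]
def isConfigLoopA (cond : Bool) : List Char → Bool
  | [] => true
  | _ :: rest => if !cond then false else isConfigLoopA cond rest

def is_config_item (item : String) : Bool :=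
  if item = "w3" || item = "connection" || item = "w3_async" then true
  else if PySem.Str.len item < 3 then false
  else if !(match PySem.Str.pyGet? item 0 with
            | some c => PySem.Chars.isupper c
            | none => false) then false   -- none unreachable: len ≥ 3 here
  else
    isConfigLoopA
      (pyStrIsupper item.toList || pyStrIsnumeric item.toList || item == "_")
      (PySem.List.slice item.toList (some 1) none)

-- ===== PORT B =====
def is_config_item_alt (item : String) : Bool :=
  if item = "w3" || item = "connection" || item = "w3_async" then true
  else
    decide (3 ≤ PySem.Str.len item) &&
    (match PySem.Str.pyGet? item 0 with
     | some c => PySem.Chars.isupper c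
     | none => false) &&
    !(item.toList.any (fun c => PySem.Chars.islower c))

-- ===== PRECONDITION & SPEC =====
def Spec_is_config_item (item : String) (out : Bool) : Prop := out = is_config_item_alt item
instance (item : String) (out : Bool) : Decidable (Spec_is_config_item item out) := by unfold Spec_is_config_item; infer_instance

-- ===== CLAIM =====
def Claim_equal_is_config_item : Prop := ∀ (item : String), Dom_is_config_item item → Spec_is_config_item item (is_config_item item)

-- ===== LEMMAS AND PROOFS =====
theorem isConfigLoopA_eq (cond : Bool) (l : List Char) :
    isConfigLoopA cond l = (l.isEmpty || cond) := by
  induction l with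
  | nil => rfl
  | cons c rest ih =>
    cases cond <;> simp [isConfigLoopA, ih]

theorem slice_one_isEmpty (l : List Char) (h : 3 ≤ l.length) :
    (PySem.List.slice l (some 1) none).isEmpty = false := by
  simp [PySem.List.slice]
  omega

-- the heart of the equivalence: under the guards (len ≥ 3, first char uppercase),
-- A's whole-string condition collapses to "no lowercase character".
theorem cond_eq_no_lower (item : String) (c : Char) (rest : List Char)
    (hl : item.toList = c :: rest) (hc : PySem.Chars.isupper c = true)
    (hlen : 3 ≤ item.toList.length) :
    (pyStrIsupper item.toList || pyStrIsnumeric item.toList || item == "_")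
      = !(item.toList.any (fun c => PySem.Chars.islower c)) := by
  have hne : (item == "_") = false := by
    apply beq_eq_false_iff_ne.mpr
    intro h
    rw [h] at hlen
    revert hlen
    decide
  have hnotdig : PySem.Chars.isdigit c = false := by
    revert hc
    simp [PySem.Chars.isupper, PySem.Chars.isdigit, Char.le_def, UInt32.le_iff_toNat_le]
    omega
  have hnum : pyStrIsnumeric item.toList = false := by
    simp [pyStrIsnumeric, PySem.Chars.strIsdigit, hl, hnotdig]
  have hnotlow : PySem.Chars.islower c = false := by
    revert hc
    simp [PySem.Chars.isupper, PySem.Chars.islower, Char.le_def, UInt32.le_iff_toNat_le]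
    omega
  rw [hne, hnum, hl]
  simp [pyStrIsupper, hc, hnotlow, ← List.not_any_eq_all_not]

-- ===== VERDICT =====
theorem is_config_item_spec : Claim_equal_is_config_item := by
  intro item _
  unfold Spec_is_config_item is_config_item is_config_item_alt
  split_ifs with h1 h2 h3
  · rfl
  · simp only [PySem.Str.len_eq] at h2 ⊢
    simp
    intro h _
    exfalso
    rw [← String.length_toList] at h
    omega
  · simp only [Bool.not_eq_true'] at h3
    simp only [PySem.Str.pyGet?_eq, PySem.Chars.pyGet?_eq_listPyGet?] at h3
    simp [h3]
  · simp only [Bool.not_eq_true'] at h3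
    simp only [PySem.Str.len_eq] at h2
    have hlen : 3 ≤ item.toList.length := by omega
    obtain ⟨c, rest, hl⟩ : ∃ c rest, item.toList = c :: rest := by
      cases hcl : item.toList with
      | nil => rw [hcl] at hlen; simp at hlen
      | cons a b => exact ⟨a, b, rfl⟩
    have hc : PySem.Chars.isupper c = true := by
      simp only [PySem.Str.pyGet?_eq, PySem.Chars.pyGet?_eq_listPyGet?, hl,
        PySem.List.pyGet?_zero_cons] at h3
      simpa using h3
    rw [isConfigLoopA_eq, slice_one_isEmpty _ hlen,
        cond_eq_no_lower item c rest hl hc hlen]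
    simp only [PySem.Str.len_eq, PySem.Str.pyGet?_eq, PySem.Chars.pyGet?_eq_listPyGet?, hl,
      PySem.List.pyGet?_zero_cons, hc]
    simp
    intro _ _
    rw [hl] at hlen
    simp at hlen
    omega
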